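-- pv_equiv track=rewrite | github.com/rbonvall/progra-utfsm | diapos/programas/asistencia.py | total_por_clase
-- ===== SOURCE A (Python) =====
-- def total_por_clase(tabla):
--     nr_alumnos = len(tabla)
--     nr_clases = len(tabla[0])
--     t = [0] * nr_clases
--     for i in range(nr_alumnos):
--         for j in range(nr_clases):
--             if tabla[i][j]:
--                 t[j] = t[j] + 1
--     return t
-- ===== SOURCE B (Python) =====
-- def total_por_clase(tabla):
--     nr_clases = len(tabla[0])
--     def suma(u, v):
--         return [u[j] + v[j] for j in range(nr_clases)]
--     def conteo(filas):
--         if not filas: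
--             return [0] * nr_clases
--         if len(filas) == 1:
--             fila = filas[0]
--             return [1 if fila[j] else 0 for j in range(nr_clases)]
--         mid = len(filas) // 2
--         return suma(conteo(filas[:mid]), conteo(filas[mid:]))
--     return conteo(tabla)
-- ===== Notes on version B (the rewrite author's own statement) =====
-- stated objective: alternative
-- what changed: Divide-and-conquer tree reduction: each row becomes a 0/1 indicator vector and halves of the table are summed recursively by vector addition, instead of A's row-major nested loops incrementally updating a shared accumulator list.
import Mathlib
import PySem

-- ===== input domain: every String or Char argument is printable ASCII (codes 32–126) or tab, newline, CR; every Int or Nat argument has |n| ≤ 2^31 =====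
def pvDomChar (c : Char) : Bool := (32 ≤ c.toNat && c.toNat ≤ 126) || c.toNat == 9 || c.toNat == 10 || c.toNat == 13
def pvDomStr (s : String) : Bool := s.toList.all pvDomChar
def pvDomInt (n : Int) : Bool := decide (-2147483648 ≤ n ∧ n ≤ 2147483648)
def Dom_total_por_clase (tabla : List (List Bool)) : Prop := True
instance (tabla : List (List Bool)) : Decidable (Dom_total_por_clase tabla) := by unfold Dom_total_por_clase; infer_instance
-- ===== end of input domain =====

-- B replaces A's row-major nested loops over a shared accumulator by a
-- divide-and-conquer tree reduction (rows → 0/1 indicator vectors, halves summed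
-- by vector addition); objective: alternative, same O(n*m) cost.

-- ===== PORT A =====
def total_por_clase (tabla : List (List Bool)) : List Int :=
  let nr_clases := (tabla.headD []).length
  let t : List Int := List.replicate nr_clases 0
  tabla.foldl (fun t fila =>
    (List.range nr_clases).foldl (fun t j =>
      if fila.getD j false then t.set j (t.getD j 0 + 1) else t) t) t

-- ===== PORT B =====
-- helper `suma` of Source B
def pvSuma (m : Nat) (u v : List Int) : List Int :=
  (List.range m).map (fun j => u.getD j 0 + v.getD j 0)

-- helper `conteo` of Source B (recursion on the halves, as in Source B)
def pvConteo (m : Nat) (filas : List (List Bool)) : List Int :=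
  if filas = [] then List.replicate m 0
  else if filas.length = 1 then
    (List.range m).map (fun j => if (filas.headD []).getD j false then (1 : Int) else 0)
  else
    let mid := filas.length / 2
    pvSuma m (pvConteo m (filas.take mid)) (pvConteo m (filas.drop mid))
termination_by filas.length
decreasing_by
  · have h1 : filas.length ≠ 0 := by simpa [List.length_eq_zero_iff] using ‹¬filas = []›
    simp only [List.length_take]
    omega
  · have h1 : filas.length ≠ 0 := by simpa [List.length_eq_zero_iff] using ‹¬filas = []›
    simp only [List.length_drop]
    omega

def total_por_clase_alt (tabla : List (List Bool)) : List Int :=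
  pvConteo (tabla.headD []).length tabla

-- ===== PRECONDITION & SPEC =====
-- Pre_ excludes exactly the inputs on which A raises IndexError: the empty table
-- (tabla[0]) and tables with a row shorter than the first row (tabla[i][j]).
def Pre_total_por_clase (tabla : List (List Bool)) : Prop :=
  tabla ≠ [] ∧ ∀ fila ∈ tabla, (tabla.headD []).length ≤ fila.length
instance (tabla : List (List Bool)) : Decidable (Pre_total_por_clase tabla) := by unfold Pre_total_por_clase; infer_instance

def pvWitness_total_por_clase : List (List Bool) := [[true, false], [true, true]]

def Spec_total_por_clase (tabla : List (List Bool)) (out : List Int) : Prop := out = total_por_clase_alt tabla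
instance (tabla : List (List Bool)) (out : List Int) : Decidable (Spec_total_por_clase tabla out) := by unfold Spec_total_por_clase; infer_instance

-- ===== CLAIM (what is proved, stated in full; the proofs are below) =====
def Claim_equal_total_por_clase : Prop := ∀ (tabla : List (List Bool)), Dom_total_por_clase tabla → Pre_total_por_clase tabla → Spec_total_por_clase tabla (total_por_clase tabla)

-- ===== LEMMAS AND PROOFS =====

-- Both sides are characterised against the same column-count formula.
def pvCols (m : Nat) (filas : List (List Bool)) : List Int :=
  (List.range m).map (fun j => ((filas.countP (fun fila => fila.getD j false) : Nat) : Int))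

lemma map_range_getD (m : Nat) (f : Nat → Int) (j : Nat) (hj : j < m) :
    ((List.range m).map f).getD j 0 = f j := by
  rw [List.getD_eq_getElem?_getD, List.getElem?_map, List.getElem?_range hj]
  rfl

-- B's helper computes pvCols.
lemma conteo_eq_cols (m : Nat) (filas : List (List Bool)) :
    pvConteo m filas = pvCols m filas := by
  induction hn : filas.length using Nat.strong_induction_on generalizing filas with
  | _ n ih =>
    rw [pvConteo]
    by_cases h0 : filas = []
    · subst h0
      rw [if_pos rfl]
      unfold pvCols
      apply List.ext_getElem <;> simp
    · rw [if_neg h0]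
      by_cases h1 : filas.length = 1
      · rw [if_pos h1]
        obtain ⟨a, rest, rfl⟩ := List.exists_cons_of_ne_nil h0
        have : rest = [] := by simpa using h1
        subst this
        unfold pvCols
        apply List.map_congr_left
        intro j _
        by_cases hb : a.getD j false <;> simp [List.countP_cons, hb]
      · rw [if_neg h1]
        have hlen : filas.length ≠ 0 := by simpa [List.length_eq_zero_iff] using h0
        have htake : (filas.take (filas.length / 2)).length < n := by
          simp only [List.length_take]; omega
        have hdrop : (filas.drop (filas.length / 2)).length < n := by
          simp only [List.length_drop]; omega
        show pvSuma m (pvConteo m (filas.take (filas.length / 2)))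
            (pvConteo m (filas.drop (filas.length / 2))) = pvCols m filas
        rw [ih _ htake _ rfl, ih _ hdrop _ rfl]
        unfold pvSuma pvCols
        apply List.map_congr_left
        intro j hj
        rw [List.mem_range] at hj
        rw [map_range_getD _ _ j hj, map_range_getD _ _ j hj]
        rw [← Nat.cast_add, ← List.countP_append, List.take_append_drop]

-- A's inner-loop body, definitionally equal to the lambda in the port of A.
def pvStep (fila : List Bool) (t : List Int) (j : Nat) : List Int :=
  if fila.getD j false then t.set j (t.getD j 0 + 1) else t

lemma pvStep_length (fila : List Bool) (t : List Int) (j : Nat) :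
    (pvStep fila t j).length = t.length := by
  unfold pvStep; split <;> simp

lemma pvStep_pos (fila : List Bool) (t : List Int) (j : Nat)
    (h : fila.getD j false = true) : pvStep fila t j = t.set j (t.getD j 0 + 1) := by
  unfold pvStep; rw [if_pos h]

lemma pvStep_neg (fila : List Bool) (t : List Int) (j : Nat)
    (h : fila.getD j false = false) : pvStep fila t j = t := by
  unfold pvStep; rw [h]; simp

lemma inner_length (fila : List Bool) (m : Nat) (t : List Int) :
    ((List.range m).foldl (pvStep fila) t).length = t.length := by
  induction m with
  | zero => simp
  | succ m ih =>
    rw [List.range_succ, List.foldl_append, List.foldl_cons, List.foldl_nil,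
        pvStep_length, ih]

lemma inner_getD (fila : List Bool) (m : Nat) (t : List Int) (hm : m ≤ t.length)
    (j : Nat) :
    ((List.range m).foldl (pvStep fila) t).getD j 0
      = t.getD j 0 + (if j < m ∧ fila.getD j false then 1 else 0) := by
  induction m with
  | zero => simp
  | succ m ih =>
    rw [List.range_succ, List.foldl_append, List.foldl_cons, List.foldl_nil]
    have hm' : m ≤ t.length := by omega
    have hulen : ((List.range m).foldl (pvStep fila) t).length = t.length :=
      inner_length fila m t
    by_cases hc : fila.getD m false
    · rw [pvStep_pos fila _ m hc]
      by_cases hj : j = m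
      · subst hj
        rw [List.getD_eq_getElem?_getD, List.getElem?_set_self (by omega),
            Option.getD_some, ih hm',
            if_neg (fun h => absurd h.1 (lt_irrefl j)),
            if_pos ⟨Nat.lt_succ_self j, hc⟩]
        ring
      · rw [List.getD_eq_getElem?_getD, List.getElem?_set_ne (by omega),
            ← List.getD_eq_getElem?_getD, ih hm']
        have hiff : (j < m ∧ fila.getD j false) ↔ (j < m + 1 ∧ fila.getD j false) := by
          constructor <;> rintro ⟨h1, h2⟩ <;> exact ⟨by omega, h2⟩
        rw [if_congr hiff rfl rfl]
    · rw [pvStep_neg fila _ m (by simpa using hc)]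
      rw [ih hm']
      have hiff : (j < m ∧ fila.getD j false) ↔ (j < m + 1 ∧ fila.getD j false) := by
        constructor
        · rintro ⟨h1, h2⟩; exact ⟨by omega, h2⟩
        · rintro ⟨h1, h2⟩
          refine ⟨?_, h2⟩
          rcases Nat.lt_succ_iff_lt_or_eq.mp h1 with h | h
          · exact h
          · subst h; exact absurd h2 (by simpa using hc)
      rw [if_congr hiff rfl rfl]

lemma outer_fold_spec (tabla : List (List Bool)) (m : Nat) (t : List Int)
    (ht : t.length = m) :
    tabla.foldl (fun t fila => (List.range m).foldl (pvStep fila) t) t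
      = (List.range m).map
          (fun j => t.getD j 0 + (tabla.countP (fun fila => fila.getD j false) : Nat)) := by
  induction tabla generalizing t with
  | nil =>
    simp only [List.foldl_nil, List.countP_nil, Nat.cast_zero, add_zero]
    apply List.ext_getElem
    · simp [ht]
    · intro j h1 h2
      simp only [List.getElem_map, List.getElem_range]
      rw [List.getD_eq_getElem?_getD, List.getElem?_eq_getElem h1, Option.getD_some]
  | cons fila rest ih =>
    rw [List.foldl_cons]
    rw [ih _ (by rw [inner_length, ht])]
    apply List.map_congr_left
    intro j hj
    rw [List.mem_range] at hj
    rw [inner_getD fila m t (by omega) j, List.countP_cons]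
    have : j < m ∧ fila.getD j false ↔ (fila.getD j false = true) := by
      simp [hj]
    rw [if_congr this rfl rfl]
    push_cast
    split <;> ring

-- ===== VERDICT (by name: the statement is the Claim_ definition above) =====
theorem total_por_clase_spec : Claim_equal_total_por_clase := by
  intro tabla _ hpre
  unfold Spec_total_por_clase total_por_clase total_por_clase_alt
  rw [conteo_eq_cols]
  show tabla.foldl
      (fun t fila => (List.range (tabla.headD []).length).foldl (pvStep fila) t)
      (List.replicate (tabla.headD []).length 0) = _
  rw [outer_fold_spec tabla (tabla.headD []).length _ (by simp)]
  unfold pvCols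
  apply List.map_congr_left
  intro j hj
  rw [List.mem_range] at hj
  rw [List.getD_eq_getElem?_getD, List.getElem?_eq_getElem (by simpa using hj)]
  simp
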